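-- pv_equiv track=rewrite | github.com/kishor-sudo/NLP-Web-Project | ai-text-intelligence-web/backend/modules/song_interpreter.py | detect_themes
-- ===== SOURCE A (Python) =====
-- from collections import Counter
--
-- THEME_KEYWORDS = {
--     "Love & Romance": ["love", "heart", "kiss", "forever", "baby", "darling", "romance", "sweet"],
--     "Heartbreak & Sadness": ["cry", "tears", "broken", "lonely", "goodbye", "hurt", "pain", "sad"],
--     "Motivation & Resilience": ["strong", "fight", "survive", "power", "rise", "champion", "believe"],
--     "Happiness & Celebration": ["happy", "dance", "party", "smile", "joy", "celebrate", "tonight", "fun"],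
--     "Nostalgia & Memories": ["remember", "yesterday", "past", "memory", "time", "back", "young"],
-- }
--
-- def detect_themes(tokens: list) -> list:
--     theme_scores = Counter()
--
--     for token in tokens:
--         for theme, keywords in THEME_KEYWORDS.items():
--             if token in keywords:
--                 theme_scores[theme] += 1
--
--     if not theme_scores:
--         return ["General / Ambiguous"]
--
--     if "Nostalgia & Memories" in theme_scores:
--         return ["Nostalgia & Memories"]
--
--     # Return top 2 themes
--     return [theme for theme, _ in theme_scores.most_common(2)]
-- ===== SOURCE B (Python) =====
-- THEME_KEYWORDS = {
--     "Love & Romance": ["love", "heart", "kiss", "forever", "baby", "darling", "romance", "sweet"],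
--     "Heartbreak & Sadness": ["cry", "tears", "broken", "lonely", "goodbye", "hurt", "pain", "sad"],
--     "Motivation & Resilience": ["strong", "fight", "survive", "power", "rise", "champion", "believe"],
--     "Happiness & Celebration": ["happy", "dance", "party", "smile", "joy", "celebrate", "tonight", "fun"],
--     "Nostalgia & Memories": ["remember", "yesterday", "past", "memory", "time", "back", "young"],
-- }
--
-- # Inverted index: each keyword maps to its (unique) theme.
-- KEYWORD_TO_THEME = {kw: theme for theme, kws in THEME_KEYWORDS.items() for kw in kws}
--
-- NOSTALGIA_KW = frozenset(THEME_KEYWORDS["Nostalgia & Memories"])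
--
-- def detect_themes(tokens: list) -> list:
--     # Single pass with an inverted index; any Nostalgia keyword decides the
--     # answer immediately (A's tail would return it regardless of the rest).
--     scores = {}
--     for token in tokens:
--         if token in NOSTALGIA_KW:
--             return ["Nostalgia & Memories"]
--         theme = KEYWORD_TO_THEME.get(token)
--         if theme is not None:
--             scores[theme] = scores.get(theme, 0) + 1
--
--     if not scores:
--         return ["General / Ambiguous"]
--
--     # Top two by two stable max-scans instead of sorting (ties: first-inserted wins,
--     # exactly Counter.most_common's rule).
--     items = list(scores.items())
--     best = max(items, key=lambda p: p[1])
--     rest = [p for p in items if p[0] != best[0]]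
--     if not rest:
--         return [best[0]]
--     second = max(rest, key=lambda p: p[1])
--     return [best[0], second[0]]
-- ===== Notes on version B (the rewrite author's own statement) =====
-- stated objective: faster
-- what changed: Replaces A's per-token inner scan of all five theme keyword lists by one precomputed keyword-to-theme inverted index consulted once per token in a single recursive pass that returns 'Nostalgia & Memories' immediately on the first nostalgia keyword, and picks the top two themes by two stable max-scans of the score dict instead of sorting via most_common.
import Mathlib
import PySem

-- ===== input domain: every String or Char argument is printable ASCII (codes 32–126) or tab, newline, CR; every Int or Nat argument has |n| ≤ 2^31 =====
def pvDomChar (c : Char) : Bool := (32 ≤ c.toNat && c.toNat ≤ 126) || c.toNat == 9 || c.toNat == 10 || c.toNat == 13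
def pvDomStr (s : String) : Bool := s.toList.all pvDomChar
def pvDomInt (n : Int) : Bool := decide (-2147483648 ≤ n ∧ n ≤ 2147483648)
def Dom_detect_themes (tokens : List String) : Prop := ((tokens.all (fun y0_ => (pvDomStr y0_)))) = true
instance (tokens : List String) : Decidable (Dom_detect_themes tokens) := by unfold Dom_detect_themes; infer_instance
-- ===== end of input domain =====

-- B replaces A's per-token scan over the five keyword lists by one precomputed keyword→theme
-- inverted index in a single recursive pass that returns "Nostalgia & Memories" the moment a
-- nostalgia keyword appears, and picks the top two themes by two stable max-scans instead of sorting.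

-- ===== PORT A =====
def THEME_KEYWORDS : List (String × List String) := [
  ("Love & Romance", ["love", "heart", "kiss", "forever", "baby", "darling", "romance", "sweet"]),
  ("Heartbreak & Sadness", ["cry", "tears", "broken", "lonely", "goodbye", "hurt", "pain", "sad"]),
  ("Motivation & Resilience", ["strong", "fight", "survive", "power", "rise", "champion", "believe"]),
  ("Happiness & Celebration", ["happy", "dance", "party", "smile", "joy", "celebrate", "tonight", "fun"]),
  ("Nostalgia & Memories", ["remember", "yesterday", "past", "memory", "time", "back", "young"])]

def detect_themes (tokens : List String) : List String :=
  let theme_scores : PySem.Dict String Int :=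
    tokens.foldl (fun d token =>
      THEME_KEYWORDS.foldl (fun d tk =>
        if tk.2.contains token then d.modify tk.1 0 (· + 1) else d) d)
      PySem.Dict.empty
  if theme_scores.items = [] then ["General / Ambiguous"]
  else if theme_scores.contains "Nostalgia & Memories" then ["Nostalgia & Memories"]
  else ((PySem.List.sorted theme_scores.items (fun p => p.2) true).take 2).map Prod.fst

-- ===== PORT B =====
-- KEYWORD_TO_THEME = {kw: theme for theme, kws in THEME_KEYWORDS.items() for kw in kws}
def KEYWORD_TO_THEME : PySem.Dict String String :=
  THEME_KEYWORDS.foldl (fun d tk => tk.2.foldl (fun d kw => d.insert kw tk.1) d) PySem.Dict.empty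

-- NOSTALGIA_KW = frozenset(THEME_KEYWORDS["Nostalgia & Memories"])
def NOSTALGIA_KW : PySem.Set String :=
  PySem.Set.ofList (PySem.Dict.mk THEME_KEYWORDS |>.getD "Nostalgia & Memories" [])

-- the single pass of Source B: early return on a nostalgia keyword, otherwise one index lookup
-- per token; at the end of the list, Source B's tail (empty dict / two stable max-scans).
def detectLoop : List String → PySem.Dict String Int → List String
  | [], scores =>
    if scores.items = [] then ["General / Ambiguous"]
    else
      match PySem.List.max? scores.items (fun p => p.2) with
      | none => []           -- unreachable: scores.items ≠ []
      | some best =>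
        let rest := scores.items.filter (fun p => p.1 != best.1)
        if rest = [] then [best.1]
        else
          match PySem.List.max? rest (fun p => p.2) with
          | none => [best.1] -- unreachable: rest ≠ []
          | some second => [best.1, second.1]
  | token :: more, scores =>
    if NOSTALGIA_KW.contains token then ["Nostalgia & Memories"]
    else
      match KEYWORD_TO_THEME.get? token with
      | some theme => detectLoop more (scores.insert theme (scores.getD theme 0 + 1))
      | none => detectLoop more scores

def detect_themes_alt (tokens : List String) : List String :=
  detectLoop tokens PySem.Dict.empty

-- ===== PRECONDITION & SPEC =====
def Spec_detect_themes (tokens : List String) (out : List String) : Prop := out = detect_themes_alt tokens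
instance (tokens : List String) (out : List String) : Decidable (Spec_detect_themes tokens out) := by unfold Spec_detect_themes; infer_instance

-- ===== CLAIM (what is proved, stated in full; the proofs are below) =====
def Claim_equal_detect_themes : Prop := ∀ (tokens : List String), Dom_detect_themes tokens → Spec_detect_themes tokens (detect_themes tokens)

-- ===== LEMMAS AND PROOFS =====
set_option maxRecDepth 200000

-- Proof-side names for the two halves of A's body.
def stepA (d : PySem.Dict String Int) (token : String) : PySem.Dict String Int :=
  THEME_KEYWORDS.foldl (fun d tk =>
    if tk.2.contains token then d.modify tk.1 0 (· + 1) else d) d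

def tailA (scores : PySem.Dict String Int) : List String :=
  if scores.items = [] then ["General / Ambiguous"]
  else if scores.contains "Nostalgia & Memories" then ["Nostalgia & Memories"]
  else ((PySem.List.sorted scores.items (fun p => p.2) true).take 2).map Prod.fst

theorem A_as_fold (tokens : List String) :
    detect_themes tokens = tailA (tokens.foldl stepA PySem.Dict.empty) := rfl

-- All 38 keywords, flattened (proof helper).
def ALL_KW : List String := ["love", "heart", "kiss", "forever", "baby", "darling", "romance", "sweet", "cry", "tears", "broken", "lonely", "goodbye", "hurt", "pain", "sad", "strong", "fight", "survive", "power", "rise", "champion", "believe", "happy", "dance", "party", "smile", "joy", "celebrate", "tonight", "fun", "remember", "yesterday", "past", "memory", "time", "back", "young"]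

-- A's per-token scan of the five keyword lists equals one inverted-index lookup
-- (the keyword lists are pairwise disjoint, so a token matches at most one theme;
-- Counter[theme] += 1 and B's scores[theme] = scores.get(theme, 0) + 1 are the same update).
set_option maxRecDepth 4096 in
theorem stepA_eq (t : String) (d : PySem.Dict String Int) :
    stepA d t = (match KEYWORD_TO_THEME.get? t with
       | some theme => d.insert theme (d.getD theme 0 + 1)
       | none => d) := by
  unfold stepA
  by_cases h : t ∈ ALL_KW
  · simp only [ALL_KW, List.mem_cons, List.not_mem_nil, or_false] at h
    rcases h with rfl|rfl|rfl|rfl|rfl|rfl|rfl|rfl|rfl|rfl|rfl|rfl|rfl|rfl|rfl|rfl|rfl|rfl|rfl|rfl|rfl|rfl|rfl|rfl|rfl|rfl|rfl|rfl|rfl|rfl|rfl|rfl|rfl|rfl|rfl|rfl|rfl|rfl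
    all_goals rfl
  · simp only [ALL_KW, List.mem_cons, List.not_mem_nil, or_false] at h
    push Not at h
    obtain ⟨h1,h2,h3,h4,h5,h6,h7,h8,h9,h10,h11,h12,h13,h14,h15,h16,h17,h18,h19,h20,h21,h22,h23,h24,h25,h26,h27,h28,h29,h30,h31,h32,h33,h34,h35,h36,h37,h38⟩ := h
    have hmk : KEYWORD_TO_THEME = PySem.Dict.mk [("love", "Love & Romance"), ("heart", "Love & Romance"), ("kiss", "Love & Romance"), ("forever", "Love & Romance"), ("baby", "Love & Romance"), ("darling", "Love & Romance"), ("romance", "Love & Romance"), ("sweet", "Love & Romance"), ("cry", "Heartbreak & Sadness"), ("tears", "Heartbreak & Sadness"), ("broken", "Heartbreak & Sadness"), ("lonely", "Heartbreak & Sadness"), ("goodbye", "Heartbreak & Sadness"), ("hurt", "Heartbreak & Sadness"), ("pain", "Heartbreak & Sadness"), ("sad", "Heartbreak & Sadness"), ("strong", "Motivation & Resilience"), ("fight", "Motivation & Resilience"), ("survive", "Motivation & Resilience"), ("power", "Motivation & Resilience"), ("rise", "Motivation & Resilience"), ("champion", "Motivation & Resilience"), ("believe", "Motivation & Resilience"),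 ("happy", "Happiness & Celebration"), ("dance", "Happiness & Celebration"), ("party", "Happiness & Celebration"), ("smile", "Happiness & Celebration"), ("joy", "Happiness & Celebration"), ("celebrate", "Happiness & Celebration"), ("tonight", "Happiness & Celebration"), ("fun", "Happiness & Celebration"), ("remember", "Nostalgia & Memories"), ("yesterday", "Nostalgia & Memories"), ("past", "Nostalgia & Memories"), ("memory", "Nostalgia & Memories"), ("time", "Nostalgia & Memories"), ("back", "Nostalgia & Memories"), ("young", "Nostalgia & Memories")] := rfl
    have hnone : KEYWORD_TO_THEME.get? t = none := by
      rw [hmk]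
      simp [PySem.Dict.get?, Ne.symm h1, Ne.symm h2, Ne.symm h3, Ne.symm h4, Ne.symm h5, Ne.symm h6, Ne.symm h7, Ne.symm h8, Ne.symm h9, Ne.symm h10, Ne.symm h11, Ne.symm h12, Ne.symm h13, Ne.symm h14, Ne.symm h15, Ne.symm h16, Ne.symm h17, Ne.symm h18, Ne.symm h19, Ne.symm h20, Ne.symm h21, Ne.symm h22, Ne.symm h23, Ne.symm h24, Ne.symm h25, Ne.symm h26, Ne.symm h27, Ne.symm h28, Ne.symm h29, Ne.symm h30, Ne.symm h31, Ne.symm h32, Ne.symm h33, Ne.symm h34, Ne.symm h35, Ne.symm h36, Ne.symm h37, Ne.symm h38]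
    rw [hnone]
    simp [THEME_KEYWORDS, List.foldl, h1, h2, h3, h4, h5, h6, h7, h8, h9, h10, h11, h12, h13, h14, h15, h16, h17, h18, h19, h20, h21, h22, h23, h24, h25, h26, h27, h28, h29, h30, h31, h32, h33, h34, h35, h36, h37, h38]

set_option maxRecDepth 8192 in
theorem nost_lookup (t : String) (h : NOSTALGIA_KW.contains t = true) :
    KEYWORD_TO_THEME.get? t = some "Nostalgia & Memories" := by
  have hmem := (PySem.Set.contains_iff NOSTALGIA_KW t).mp h
  have h' : t ∈ (["remember", "yesterday", "past", "memory", "time", "back", "young"] : List String) := by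
    rw [NOSTALGIA_KW, PySem.Set.mem_ofList,
      (rfl : (PySem.Dict.mk THEME_KEYWORDS).getD "Nostalgia & Memories" []
        = ["remember", "yesterday", "past", "memory", "time", "back", "young"])] at hmem
    exact hmem
  simp only [List.mem_cons, List.not_mem_nil, or_false] at h'
  rcases h' with rfl|rfl|rfl|rfl|rfl|rfl|rfl <;> rfl

set_option maxRecDepth 8192 in
theorem kt_nodup : KEYWORD_TO_THEME.keys.Nodup := by decide

set_option maxRecDepth 8192 in
theorem not_nost_lookup (t : String) (h : NOSTALGIA_KW.contains t = false)
    (th : String) (hg : KEYWORD_TO_THEME.get? t = some th) :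
    th ≠ "Nostalgia & Memories" := by
  have hm := (PySem.Dict.get?_eq_some_iff_mem_items KEYWORD_TO_THEME t th kt_nodup).mp hg
  have hmk : KEYWORD_TO_THEME.items = [("love", "Love & Romance"), ("heart", "Love & Romance"), ("kiss", "Love & Romance"), ("forever", "Love & Romance"), ("baby", "Love & Romance"), ("darling", "Love & Romance"), ("romance", "Love & Romance"), ("sweet", "Love & Romance"), ("cry", "Heartbreak & Sadness"), ("tears", "Heartbreak & Sadness"), ("broken", "Heartbreak & Sadness"), ("lonely", "Heartbreak & Sadness"), ("goodbye", "Heartbreak & Sadness"), ("hurt", "Heartbreak & Sadness"), ("pain", "Heartbreak & Sadness"), ("sad", "Heartbreak & Sadness"), ("strong", "Motivation & Resilience"), ("fight", "Motivation & Resilience"), ("survive", "Motivation & Resilience"), ("power", "Motivation & Resilience"), ("rise", "Motivation & Resilience"), ("champion", "Motivation & Resilience"), ("believe", "Motivation & Resilience"), ("happy", "Happiness & Celebration"), ("dance", "Happiness & Celebration"), ("party", "Happiness & Celebration"), ("smile", "Happiness & Celebration"), ("joy", "Happiness & Celebration"), ("celebrate", "Happiness & Celebration"), ("tonight", "Happiness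 & Celebration"), ("fun", "Happiness & Celebration"), ("remember", "Nostalgia & Memories"), ("yesterday", "Nostalgia & Memories"), ("past", "Nostalgia & Memories"), ("memory", "Nostalgia & Memories"), ("time", "Nostalgia & Memories"), ("back", "Nostalgia & Memories"), ("young", "Nostalgia & Memories")] := rfl
  rw [hmk] at hm
  simp only [List.mem_cons, List.not_mem_nil, or_false, Prod.mk.injEq] at hm
  rcases hm with ⟨rfl,rfl⟩|⟨rfl,rfl⟩|⟨rfl,rfl⟩|⟨rfl,rfl⟩|⟨rfl,rfl⟩|⟨rfl,rfl⟩|⟨rfl,rfl⟩|⟨rfl,rfl⟩|⟨rfl,rfl⟩|⟨rfl,rfl⟩|⟨rfl,rfl⟩|⟨rfl,rfl⟩|⟨rfl,rfl⟩|⟨rfl,rfl⟩|⟨rfl,rfl⟩|⟨rfl,rfl⟩|⟨rfl,rfl⟩|⟨rfl,rfl⟩|⟨rfl,rfl⟩|⟨rfl,rfl⟩|⟨rfl,rfl⟩|⟨rfl,rfl⟩|⟨rfl,rfl⟩|⟨rfl,rfl⟩|⟨rfl,rfl⟩|⟨rfl,rfl⟩|⟨rfl,rfl⟩|⟨rfl,rfl⟩|⟨rfl,rfl⟩|⟨rfl,rfl⟩|⟨rfl,rfl⟩|⟨rfl,rfl⟩|⟨rfl,rfl⟩|⟨rfl,rfl⟩|⟨rfl,rfl⟩|⟨rfl,rfl⟩|⟨rfl,rfl⟩|⟨rfl,rfl⟩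 <;> first | decide | (revert h; decide)

-- ---- top-2 selection: stable-descending sort, truncated to two, equals two stable max-scans ----

def mstep (acc : Option (String × Int)) (x : String × Int) : Option (String × Int) :=
  match acc with
  | none => some x
  | some m => if m.2 < x.2 then some x else some m

def tstep (ab : Option (String × Int) × Option (String × Int)) (x : String × Int) :
    Option (String × Int) × Option (String × Int) :=
  match ab.1 with
  | none => (some x, none)
  | some a => if a.2 < x.2 then (some x, some a) else (some a, mstep ab.2 x)

theorem max?_eq_foldl (l : List (String × Int)) :
    PySem.List.max? l (fun p => p.2) = l.foldl mstep none := by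
  simp only [PySem.List.max?]
  congr 1
  funext acc x
  rcases acc with _ | m <;> rfl

def two (l : List (String × Int)) : Option (String × Int) × Option (String × Int) :=
  (l.head?, l.tail.head?)

-- the first two slots of the (stable, descending) insertion sort evolve by tstep
theorem sorted_rev_two (l : List (String × Int)) :
    two (PySem.List.sorted l (fun p => p.2) true) = l.foldl tstep (none, none) := by
  rw [PySem.List.sorted_rev_eq_foldl_insertBy]
  have ins_two : ∀ (acc : List (String × Int)) (x : String × Int),
      two (PySem.List.insertBy (fun a b => decide (b.2 < a.2)) x acc) = tstep (two acc) x := by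
    intro acc x
    match acc with
    | [] => rfl
    | [a] =>
      simp only [PySem.List.insertBy, two, tstep, mstep]
      by_cases h : a.2 < x.2 <;> simp [h]
    | a :: b :: t =>
      simp only [PySem.List.insertBy, two, tstep, mstep]
      by_cases h : a.2 < x.2 <;> by_cases h2 : b.2 < x.2 <;> simp [h, h2]
  have gen : ∀ (l : List (String × Int)) (acc : List (String × Int)),
      two (l.foldl (fun acc x => PySem.List.insertBy (fun a b => decide (b.2 < a.2)) x acc) acc)
      = l.foldl tstep (two acc) := by
    intro l
    induction l with
    | nil => intro acc; rfl
    | cons x xs ih => intro acc; simp only [List.foldl_cons, ih, ins_two]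
  simpa using gen l []

theorem foldl_append_one {β : Type} (f : β → String × Int → β) (i : β)
    (l : List (String × Int)) (x : String × Int) :
    (l ++ [x]).foldl f i = f (l.foldl f i) x := by
  simp [List.foldl_append]

-- the tstep fold computes (first max, first max of the list with that occurrence removed)
theorem tstep_spec (l : List (String × Int)) (hnd : (l.map Prod.fst).Nodup) :
    l.foldl tstep (none, none)
      = (l.foldl mstep none,
         (l.foldl mstep none).elim none (fun m => PySem.List.max? (l.erase m) (fun p => p.2))) := by
  induction l using List.reverseRecOn with
  | nil => rfl
  | append_singleton l x ih =>
    have hnd' : (l.map Prod.fst).Nodup := by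
      simpa using (List.nodup_append.mp (by simpa using hnd)).1
    have hnd2 : (l.map Prod.fst ++ [x.1]).Nodup := by simpa using hnd
    have hx : x.1 ∉ l.map Prod.fst := by
      intro hc
      exact List.disjoint_of_nodup_append hnd2 hc (List.mem_singleton_self _)
    have hxl : x ∉ l := fun hc => hx (List.mem_map_of_mem hc)
    rw [foldl_append_one, foldl_append_one, ih hnd']
    rcases hM : l.foldl mstep none with _ | m
    · have hl : l = [] := by
        have := PySem.List.max?_eq_none_iff (xs := l) (key := fun p : String × Int => p.2)
        rw [max?_eq_foldl] at this; exact this.mp hM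
      subst hl
      simp [tstep, mstep, PySem.List.max?, List.erase_cons_head]
    · have hmem : m ∈ l := by
        have := PySem.List.max?_mem (xs := l) (key := fun p : String × Int => p.2) (m := m)
        rw [max?_eq_foldl] at this; exact this hM
      by_cases hlt : m.2 < x.2
      · have herase : (l ++ [x]).erase x = l := by
          rw [List.erase_append_right _ hxl]; simp
        simp [tstep, mstep, hlt, herase, max?_eq_foldl, hM]
      · have herase : (l ++ [x]).erase m = l.erase m ++ [x] := by
          rw [List.erase_append_left _ hmem]
        simp [tstep, mstep, hlt, herase, max?_eq_foldl]

-- with pairwise-distinct keys, filtering out the best key removes exactly its entry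
theorem erase_eq_filter (l : List (String × Int)) (hnd : (l.map Prod.fst).Nodup)
    (m : String × Int) (hm : m ∈ l) :
    l.filter (fun p => p.1 != m.1) = l.erase m := by
  induction l with
  | nil => cases hm
  | cons a t ih =>
    simp only [List.map_cons, List.nodup_cons] at hnd
    by_cases ha : a = m
    · subst ha
      rw [List.erase_cons_head]
      rw [List.filter_cons_of_neg (by simp)]
      apply List.filter_eq_self.mpr
      intro p hp
      simp only [bne_iff_ne, ne_eq]
      intro hpe
      exact hnd.1 (hpe ▸ List.mem_map_of_mem hp)
    · have hmt : m ∈ t := (List.mem_cons.mp hm).resolve_left (fun h => ha h.symm)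
      have hane : a.1 ≠ m.1 := by
        intro he
        exact hnd.1 (he ▸ List.mem_map_of_mem hmt)
      rw [List.erase_cons_tail (by simpa using ha)]
      rw [List.filter_cons_of_pos (by simpa using hane)]
      rw [ih hnd.2 hmt]

theorem sel_eq (l : List (String × Int)) (hl : l ≠ []) (hnd : (l.map Prod.fst).Nodup) :
    ((PySem.List.sorted l (fun p => p.2) true).take 2).map Prod.fst
    = (match PySem.List.max? l (fun p => p.2) with
      | none => []
      | some best =>
        let rest := l.filter (fun p => p.1 != best.1)
        if rest = [] then [best.1]
        else
          match PySem.List.max? rest (fun p => p.2) with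
          | none => [best.1]
          | some second => [best.1, second.1]) := by
  have htwo := sorted_rev_two l
  rw [tstep_spec l hnd] at htwo
  rcases hM : PySem.List.max? l (fun p => p.2) with _ | best
  · exact absurd ((PySem.List.max?_eq_none_iff (xs := l) (key := fun p : String × Int => p.2)).mp hM) hl
  · have hbm : best ∈ l := PySem.List.max?_mem hM
    rw [max?_eq_foldl] at hM
    rw [hM] at htwo
    simp only [Option.elim] at htwo
    have hrest : l.filter (fun p => p.1 != best.1) = l.erase best := erase_eq_filter l hnd best hbm
    rcases hs : PySem.List.sorted l (fun p => p.2) true with _ | ⟨b, t⟩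
    · rw [hs] at htwo; simp [two] at htwo
    · rw [hs] at htwo
      simp only [two, List.head?_cons, List.tail_cons, Prod.mk.injEq] at htwo
      obtain ⟨hb, ht⟩ := htwo
      cases hb
      rcases hS : PySem.List.max? (l.erase best) (fun p => p.2) with _ | second
      · have ht' : t = [] := by
          rw [hS] at ht
          exact List.head?_eq_none_iff.mp ht
        subst ht'
        have hre : l.erase best = [] :=
          (PySem.List.max?_eq_none_iff (xs := l.erase best) (key := fun p : String × Int => p.2)).mp hS
        simp [hrest, hre]
      · rw [hS] at ht
        rcases t with _ | ⟨s2, t'⟩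
        · simp at ht
        · simp only [List.head?_cons, Option.some.injEq] at ht
          subst ht
          have hrne : l.filter (fun p => p.1 != best.1) ≠ [] := by
            rw [hrest]
            intro h0
            rw [h0] at hS
            simp [PySem.List.max?] at hS
          simp only [hrest] at hrne ⊢
          simp [hrne, hS]

-- ---- the dict-level argument ----

theorem detectLoop_nil (d : PySem.Dict String Int) :
    detectLoop [] d
    = (if d.items = [] then ["General / Ambiguous"]
      else
        match PySem.List.max? d.items (fun p => p.2) with
        | none => []
        | some best =>
          let rest := d.items.filter (fun p => p.1 != best.1)
          if rest = [] then [best.1]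
          else
            match PySem.List.max? rest (fun p => p.2) with
            | none => [best.1]
            | some second => [best.1, second.1]) := rfl

theorem detectLoop_cons (t : String) (more : List String) (d : PySem.Dict String Int) :
    detectLoop (t :: more) d
    = (if NOSTALGIA_KW.contains t then ["Nostalgia & Memories"]
      else
        match KEYWORD_TO_THEME.get? t with
        | some theme => detectLoop more (d.insert theme (d.getD theme 0 + 1))
        | none => detectLoop more d) := rfl

theorem keys_eq_map_fst (d : PySem.Dict String Int) : d.keys = d.items.map Prod.fst := rfl

theorem contains_items_ne (d : PySem.Dict String Int)
    (h : d.contains "Nostalgia & Memories" = true) : d.items ≠ [] := by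
  intro h0
  rw [PySem.Dict.contains, h0] at h
  simp at h

-- after A's fold, a dict that already holds the Nostalgia key yields ["Nostalgia & Memories"]
set_option maxRecDepth 8192 in
theorem tail_nost : ∀ (ts : List String) (d : PySem.Dict String Int),
    d.contains "Nostalgia & Memories" = true →
    tailA (ts.foldl stepA d) = ["Nostalgia & Memories"] := by
  intro ts
  induction ts with
  | nil =>
    intro d h
    unfold tailA
    rw [List.foldl_nil, if_neg (contains_items_ne d h), if_pos h]
  | cons t rest ih =>
    intro d h
    rw [List.foldl_cons]
    apply ih
    rw [stepA_eq]
    rcases hg : KEYWORD_TO_THEME.get? t with _ | th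
    · simpa using h
    · simp [PySem.Dict.contains_insert, h]

theorem tail_eq (d : PySem.Dict String Int) (hnd : d.keys.Nodup)
    (hno : d.contains "Nostalgia & Memories" = false) :
    tailA d = detectLoop [] d := by
  unfold tailA
  rw [detectLoop_nil]
  by_cases h0 : d.items = []
  · rw [if_pos h0, if_pos h0]
  · rw [if_neg h0, if_neg h0, hno]
    simp only [Bool.false_eq_true, if_false]
    exact sel_eq d.items h0 (by rw [keys_eq_map_fst] at hnd; exact hnd)

set_option maxRecDepth 8192 in
theorem loop_eq : ∀ (ts : List String) (d : PySem.Dict String Int),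
    d.keys.Nodup → d.contains "Nostalgia & Memories" = false →
    tailA (ts.foldl stepA d) = detectLoop ts d := by
  intro ts
  induction ts with
  | nil => intro d hnd hno; exact tail_eq d hnd hno
  | cons t rest ih =>
    intro d hnd hno
    rw [List.foldl_cons, stepA_eq]
    by_cases hn : NOSTALGIA_KW.contains t = true
    · rw [nost_lookup t hn]
      have : (d.insert "Nostalgia & Memories" (d.getD "Nostalgia & Memories" 0 + 1)).contains "Nostalgia & Memories" = true :=
        PySem.Dict.contains_insert_self d _ _
      rw [tail_nost rest _ this, detectLoop_cons, if_pos hn]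
    · have hn' : NOSTALGIA_KW.contains t = false := by simpa using hn
      rw [detectLoop_cons, if_neg hn]
      rcases hg : KEYWORD_TO_THEME.get? t with _ | th
      · exact ih d hnd hno
      · have hth : th ≠ "Nostalgia & Memories" := not_nost_lookup t hn' th hg
        exact ih (d.insert th (d.getD th 0 + 1))
          (PySem.Dict.nodup_keys_insert d th _ hnd)
          (by simp [PySem.Dict.contains_insert, hno, beq_eq_false_iff_ne, Ne.symm hth])

-- ===== VERDICT (by name: the statement is the Claim_ definition above) =====
set_option maxRecDepth 8192 in
theorem detect_themes_spec : Claim_equal_detect_themes := by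
  intro tokens _
  unfold Spec_detect_themes detect_themes_alt
  rw [A_as_fold]
  exact loop_eq tokens PySem.Dict.empty (by simp [PySem.Dict.keys, PySem.Dict.empty]) rfl
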